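-- pv_equiv track=rewrite | github.com/rsbohn/waffle8 | demo/scripts/visual_tape_reader.py | parse_sixbit_octal
-- ===== SOURCE A (Python) =====
-- from typing import List, Tuple
--
-- def parse_sixbit_octal(text: str) -> Tuple[List[int], str]:
--     """Parse SIXBIT-octal tokens (000..077) into 12-bit words (two 6-bit chars per word)."""
--     tokens = []
--     for tok in text.split():
--         if tok.startswith('#'):
--             break
--         if not all('0' <= c <= '7' for c in tok):
--             return [], f"non-octal token '{tok}'"
--         try:
--             val = int(tok, 8)
--         except ValueError:
--             return [], f"bad octal token '{tok}'"
--         if val < 0 or val > 0o77: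
--             return [], f"SIXBIT token out of range '{tok}'"
--         tokens.append(val & 0o77)
--     if len(tokens) == 0:
--         return [], 'no tokens'
--     # Pack pairs of 6-bit values into 12-bit words
--     words = []
--     for i in range(0, len(tokens), 2):
--         if i + 1 < len(tokens):
--             word = (tokens[i] << 6) | tokens[i+1]
--         else:
--             word = tokens[i] << 6
--         words.append(word & 0x0FFF)
--     return words, ''
-- ===== SOURCE B (Python) =====
-- from typing import List, Tuple
--
-- def parse_sixbit_octal(text: str) -> Tuple[List[int], str]:
--     """Single-pass parse of SIXBIT-octal tokens into 12-bit words (two 6-bit chars per word)."""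
--     words: List[int] = []
--     pending = None
--     seen = False
--     for tok in text.split():
--         if tok.startswith('#'):
--             break
--         if not all('0' <= c <= '7' for c in tok):
--             return [], f"non-octal token '{tok}'"
--         try:
--             val = int(tok, 8)
--         except ValueError:
--             return [], f"bad octal token '{tok}'"
--         if val < 0 or val > 0o77:
--             return [], f"SIXBIT token out of range '{tok}'"
--         seen = True
--         if pending is None:
--             pending = val
--         else:
--             words.append(((pending << 6) | val) & 0x0FFF)
--             pending = None
--     if not seen:
--         return [], 'no tokens'
--     if pending is not None:
--         words.append((pending << 6) & 0x0FFF)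
--     return words, ''
-- ===== Notes on version B (the rewrite author's own statement) =====
-- stated objective: alternative
-- what changed: Replaces A's two-phase design (collect all validated tokens into a list, then a second indexed loop packing pairs by stepping an index by 2) with a single fused pass that never materialises the token list: a half-word accumulator emits each packed 12-bit word as soon as its second 6-bit value arrives, with an odd-length flush after the loop.
import Mathlib
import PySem

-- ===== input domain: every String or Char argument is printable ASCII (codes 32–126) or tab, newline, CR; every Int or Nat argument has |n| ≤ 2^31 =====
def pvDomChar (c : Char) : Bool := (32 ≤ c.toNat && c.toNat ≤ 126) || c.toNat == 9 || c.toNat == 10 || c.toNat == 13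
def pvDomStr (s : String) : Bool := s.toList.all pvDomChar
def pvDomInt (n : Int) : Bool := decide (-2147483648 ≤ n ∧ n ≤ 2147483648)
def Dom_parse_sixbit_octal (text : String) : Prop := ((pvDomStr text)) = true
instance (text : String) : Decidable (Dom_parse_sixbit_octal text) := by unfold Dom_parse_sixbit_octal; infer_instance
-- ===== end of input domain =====

-- B is an 'alternative' single-pass fusion of A's two loops; equivalence is about the return value.

-- ===== PORT A =====
-- token-collection loop of A: .error = early return, .ok = collected tokens (break on '#')
def pvA_scan : List String → List Int → Except (List Int × String) (List Int)
  | [], tokens => .ok tokens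
  | tok :: rest, tokens =>
    if PySem.Str.startswith tok "#" then .ok tokens
    else if ¬ (tok.toList.all (fun c => decide ('0' ≤ c ∧ c ≤ '7'))) then
      .error ([], "non-octal token '" ++ tok ++ "'")
    else
      match PySem.Int.ofStrBase? tok 8 with
      | none => .error ([], "bad octal token '" ++ tok ++ "'")
      | some val =>
        if val < 0 ∨ val > 63 then .error ([], "SIXBIT token out of range '" ++ tok ++ "'")
        else pvA_scan rest (tokens ++ [PySem.Int.band val 63])

-- packing loop of A: 'for i in range(0, len(tokens), 2)', index recursion over i
def pvA_pack (tokens : List Int) (i : Nat) (words : List Int) : List Int :=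
  if i < tokens.length then
    let word : Int :=
      if i + 1 < tokens.length then
        PySem.Int.bor (PySem.List.pyGetD tokens (i : Int) 0 <<< 6) (PySem.List.pyGetD tokens ((i : Int) + 1) 0)
      else
        PySem.List.pyGetD tokens (i : Int) 0 <<< 6
    pvA_pack tokens (i + 2) (words ++ [PySem.Int.band word 4095])
  else words
  termination_by tokens.length - i

def parse_sixbit_octal (text : String) : List Int × String :=
  match pvA_scan (PySem.Str.split₀ text) [] with
  | .error e => e
  | .ok tokens =>
    if tokens.length = 0 then ([], "no tokens")
    else (pvA_pack tokens 0 [], "")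

-- ===== PORT B =====
-- single fused pass: half-word accumulator, words emitted as completed
def pvB_finish (words : List Int) (pending : Option Int) (seen : Bool) : List Int × String :=
  if !seen then ([], "no tokens")
  else
    match pending with
    | some p => (words ++ [PySem.Int.band (p <<< 6) 4095], "")
    | none => (words, "")

def pvB_loop : List String → List Int → Option Int → Bool → List Int × String
  | [], words, pending, seen => pvB_finish words pending seen
  | tok :: rest, words, pending, seen =>
    if PySem.Str.startswith tok "#" then pvB_finish words pending seen
    else if ¬ (tok.toList.all (fun c => decide ('0' ≤ c ∧ c ≤ '7'))) then
      ([], "non-octal token '" ++ tok ++ "'")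
    else
      match PySem.Int.ofStrBase? tok 8 with
      | none => ([], "bad octal token '" ++ tok ++ "'")
      | some val =>
        if val < 0 ∨ val > 63 then ([], "SIXBIT token out of range '" ++ tok ++ "'")
        else
          match pending with
          | none => pvB_loop rest words (some val) true
          | some p => pvB_loop rest (words ++ [PySem.Int.band (PySem.Int.bor (p <<< 6) val) 4095]) none true

def parse_sixbit_octal_alt (text : String) : List Int × String :=
  pvB_loop (PySem.Str.split₀ text) [] none false

-- ===== PRECONDITION & SPEC =====
def Spec_parse_sixbit_octal (text : String) (out : List Int × String) : Prop := out = parse_sixbit_octal_alt text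
instance (text : String) (out : List Int × String) : Decidable (Spec_parse_sixbit_octal text out) := by unfold Spec_parse_sixbit_octal; infer_instance

-- ===== CLAIM (what is proved, stated in full; the proofs are below) =====
def Claim_equal_parse_sixbit_octal : Prop := ∀ (text : String), Dom_parse_sixbit_octal text → Spec_parse_sixbit_octal text (parse_sixbit_octal text)

-- ===== LEMMAS AND PROOFS =====

-- pairwise characterisation of the packed words
def pvPack2 : List Int → List Int
  | [] => []
  | [a] => [PySem.Int.band (a <<< 6) 4095]
  | a :: b :: r => PySem.Int.band (PySem.Int.bor (a <<< 6) b) 4095 :: pvPack2 r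

-- B's per-token packing step
def pvStep (s : List Int × Option Int) (v : Int) : List Int × Option Int :=
  match s.2 with
  | none => (s.1, some v)
  | some p => (s.1 ++ [PySem.Int.band (PySem.Int.bor (p <<< 6) v) 4095], none)

theorem pvA_pack_eq_pack2 (tokens : List Int) : ∀ i words, pvA_pack tokens i words = words ++ pvPack2 (tokens.drop i) := by
  intro i
  induction hm : tokens.length - i using Nat.strong_induction_on generalizing i with
  | _ m ih =>
    intro words
    unfold pvA_pack
    by_cases h : i < tokens.length
    · simp only [h, if_pos]
      have hd : tokens.drop i = tokens[i] :: tokens.drop (i+1) := List.drop_eq_getElem_cons h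
      have hg : PySem.List.pyGetD tokens (i : Int) 0 = tokens[i] := by
        rw [PySem.List.pyGetD_natCast]
        simp [h]
      by_cases h2 : i + 1 < tokens.length
      · have hd2 : tokens.drop (i+1) = tokens[i+1] :: tokens.drop (i+2) := List.drop_eq_getElem_cons h2
        have hg2 : PySem.List.pyGetD tokens ((i : Int) + 1) 0 = tokens[i+1] := by
          have : ((i : Int) + 1) = ((i + 1 : Nat) : Int) := by push_cast; ring
          rw [this, PySem.List.pyGetD_natCast]
          simp [h2]
        rw [ih (tokens.length - (i+2)) (by omega) (i+2) rfl, hd, hd2]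
        simp only [pvPack2]
        simp [h2, hg, hg2]
      · have hd2 : tokens.drop (i+1) = [] := by
          apply List.drop_eq_nil_of_le; omega
        rw [ih (tokens.length - (i+2)) (by omega) (i+2) rfl, hd, hd2]
        have hd3 : tokens.drop (i+2) = [] := by
          apply List.drop_eq_nil_of_le; omega
        rw [hd3]
        simp only [pvPack2]
        simp [h2, hg]
    · simp [h]
      have : tokens.drop i = [] := by
        apply List.drop_eq_nil_of_le; omega
      simp [this, pvPack2]

def pvFlush (p : Option Int) : List Int :=
  match p with
  | none => []
  | some q => [PySem.Int.band (q <<< 6) 4095]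

theorem pvFoldl_both (acc : List Int) :
    (∀ w, (acc.foldl pvStep (w, none)).1 ++ pvFlush (acc.foldl pvStep (w, none)).2 = w ++ pvPack2 acc)
    ∧ (∀ w q, (acc.foldl pvStep (w, some q)).1 ++ pvFlush (acc.foldl pvStep (w, some q)).2
        = w ++ pvPack2 (q :: acc)) := by
  induction acc with
  | nil => simp [pvFlush, pvPack2]
  | cons v r ih =>
    constructor
    · intro w
      simpa [pvStep] using ih.2 w v
    · intro w q
      have := ih.1 (w ++ [PySem.Int.band (PySem.Int.bor (q <<< 6) v) 4095])
      rw [List.foldl_cons]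
      simp only [pvStep]
      rw [this]
      simp [pvPack2]

theorem pvBand63 (val : Int) (h0 : 0 ≤ val) (h1 : val ≤ 63) : PySem.Int.band val 63 = val := by
  rw [PySem.Int.band_of_nonneg h0 (by norm_num)]
  have hv : val.toNat < 64 := by omega
  have hand : val.toNat &&& (63 : Int).toNat = val.toNat := by
    show val.toNat &&& 63 = val.toNat
    have h63 : (63 : Nat) = 2 ^ 6 - 1 := by norm_num
    rw [h63, Nat.and_two_pow_sub_one_eq_mod, Nat.mod_eq_of_lt hv]
  rw [hand]
  omega

-- the finished value agrees with B's finish, given the loop-state invariant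
theorem pvFinish_agree (acc : List Int) (w : List Int) (p : Option Int)
    (hs : (w, p) = acc.foldl pvStep ([], none)) :
    (if acc.length = 0 then (([] : List Int), "no tokens") else (pvA_pack acc 0 [], ""))
      = pvB_finish w p (decide (acc ≠ [])) := by
  by_cases hacc : acc = []
  · subst hacc
    simp at hs
    simp [← hs.1, pvB_finish]
  · have hlen : ¬ acc.length = 0 := by simpa using hacc
    have hpk : w ++ pvFlush p = pvPack2 acc := by
      have := (pvFoldl_both acc).1 []
      rw [← hs] at this
      simpa using this
    rw [pvA_pack_eq_pack2 acc 0 []]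
    simp only [hlen, List.drop_zero, List.nil_append]
    rw [← hpk]
    cases p <;> simp [pvB_finish, pvFlush, hacc]

theorem pvMain (toks : List String) : ∀ acc w p,
    (w, p) = acc.foldl pvStep ([], none) →
    (match pvA_scan toks acc with
     | .error e => e
     | .ok tokens => if tokens.length = 0 then ([], "no tokens") else (pvA_pack tokens 0 [], ""))
      = pvB_loop toks w p (decide (acc ≠ [])) := by
  induction toks with
  | nil =>
    intro acc w p hs
    simpa [pvA_scan, pvB_loop] using pvFinish_agree acc w p hs
  | cons tok rest ih =>
    intro acc w p hs
    unfold pvA_scan pvB_loop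
    by_cases hh : PySem.Str.startswith tok "#" = true
    · rw [if_pos hh, if_pos hh]
      simpa using pvFinish_agree acc w p hs
    · rw [if_neg hh, if_neg hh]
      by_cases hoct : tok.toList.all (fun c => decide ('0' ≤ c ∧ c ≤ '7')) = true
      · rw [if_neg (not_not_intro hoct), if_neg (not_not_intro hoct)]
        cases hv : PySem.Int.ofStrBase? tok 8 with
        | none => rfl
        | some val =>
          dsimp only
          by_cases hr : val < 0 ∨ val > 63
          · rw [if_pos hr, if_pos hr]
          · rw [if_neg hr, if_neg hr]
            push Not at hr
            rw [pvBand63 val hr.1 hr.2]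
            have hs' : ∀ s, pvStep (w, p) val = s → s = (acc ++ [val]).foldl pvStep ([], none) := by
              intro s h
              rw [List.foldl_append, ← hs, ← h]
              simp
            cases p with
            | none =>
              have := ih (acc ++ [val]) w (some val) (hs' _ rfl)
              simpa using this
            | some q =>
              have := ih (acc ++ [val])
                (w ++ [PySem.Int.band (PySem.Int.bor (q <<< 6) val) 4095]) none (hs' _ rfl)
              simpa using this
      · rw [if_pos hoct, if_pos hoct]

-- ===== VERDICT (by name: the statement is the Claim_ definition above) =====
theorem parse_sixbit_octal_spec : Claim_equal_parse_sixbit_octal := by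
  intro text _
  unfold Spec_parse_sixbit_octal parse_sixbit_octal parse_sixbit_octal_alt
  have := pvMain (PySem.Str.split₀ text) [] [] none rfl
  simpa using this
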